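-- pv_equiv track=rewrite | github.com/Elsa9999/CTDL-v-GT | python/bai6_2.py | find_smallest_divisible_by_n
-- ===== SOURCE A (Python) =====
-- from collections import deque
--
-- def find_smallest_divisible_by_n(n):
--     q = deque()  # Sử dụng deque cho queue
--     visited_remainders = set()
--
--     q.append(("9", 9 % n))
--     visited_remainders.add(9 % n)
--
--     while q:
--         current_num_str, current_remainder = q.popleft()
--
--         if current_remainder == 0:
--             return current_num_str
--
--         # Thêm '0'
--         next_num_str_0 = current_num_str + "0"
--         next_remainder_0 = (current_remainder * 10) % n
--         if next_remainder_0 not in visited_remainders: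
--             visited_remainders.add(next_remainder_0)
--             q.append((next_num_str_0, next_remainder_0))
--
--         # Thêm '9'
--         next_num_str_9 = current_num_str + "9"
--         next_remainder_9 = (current_remainder * 10 + 9) % n
--         if next_remainder_9 not in visited_remainders:
--             visited_remainders.add(next_remainder_9)
--             q.append((next_num_str_9, next_remainder_9))
--
--     return ""  # Không nên xảy ra trong bài này
-- ===== SOURCE B (Python) =====
-- from collections import deque
--
-- def find_smallest_divisible_by_n(n):
--     r9 = 9 % n
--     pred = {r9: (None, "9")}  # remainder -> (parent remainder, appended digit)
--     q = deque([r9])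
--     while q:
--         r = q.popleft()
--         if r == 0:
--             # reconstruct the number by walking predecessors back to the seed
--             s = ""
--             cur = r
--             while cur is not None:
--                 parent, d = pred[cur]
--                 s = d + s
--                 cur = parent
--             return s
--         for d, nr in (("0", r * 10 % n), ("9", (r * 10 + 9) % n)):
--             if nr not in pred:
--                 pred[nr] = (r, d)
--                 q.append(nr)
--     return ""
-- ===== Notes on version B (the rewrite author's own statement) =====
-- stated objective: alternative
-- what changed: The BFS queue carries only integer remainders with a predecessor dict (remainder -> (parent, digit)); the answer string is reconstructed from that dict in a separate backward pass, instead of storing a candidate string with every queued node.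
import Mathlib
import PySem

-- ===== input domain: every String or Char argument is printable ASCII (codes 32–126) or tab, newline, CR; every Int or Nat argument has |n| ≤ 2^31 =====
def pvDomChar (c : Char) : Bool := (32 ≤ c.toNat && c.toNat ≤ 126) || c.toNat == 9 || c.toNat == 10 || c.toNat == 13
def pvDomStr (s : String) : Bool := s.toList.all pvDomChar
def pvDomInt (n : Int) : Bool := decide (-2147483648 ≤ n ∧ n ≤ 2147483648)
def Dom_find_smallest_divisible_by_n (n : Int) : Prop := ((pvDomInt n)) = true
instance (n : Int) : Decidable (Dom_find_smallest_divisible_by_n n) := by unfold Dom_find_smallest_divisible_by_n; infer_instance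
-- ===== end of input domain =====

-- B replaces A's string-carrying BFS by a remainder-only BFS with a predecessor dict and a
-- separate reconstruction pass (alternative decomposition; same BFS discovery order).
-- Python's deque is ported as a two-list FIFO queue and its hash set / dict as
-- Std.HashSet / Std.HashMap (only membership / lookup is consumed, so this is exact).

-- ===== PORT A =====
-- BFS loop of A: FIFO queue (front list + reversed back list) of (string, remainder) pairs,
-- visited set of remainders.  The fuel argument only makes the while-loop total; it is chosen
-- large enough to never run out (the loop pops at most 2*|n|-1 entries, each rotation and pop
-- costs one tick).
def pvLoopA (n : Int) : Nat → List (String × Int) → List (String × Int) →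
    Std.HashSet Int → String
  | 0, _, _, _ => ""
  | fuel+1, [], back, v =>
    match back with
    | [] => ""                                      -- queue empty: while loop ends
    | _ :: _ => pvLoopA n fuel back.reverse [] v    -- rotate the back list to the front
  | fuel+1, (s, r) :: rest, back, v =>
    if r = 0 then s
    else
      let r0 := PySem.Int.mod (r * 10) n
      let (back1, v1) :=
        if v.contains r0 then (back, v)
        else ((s ++ "0", r0) :: back, v.insert r0)
      let r9 := PySem.Int.mod (r * 10 + 9) n
      let (back2, v2) :=
        if v1.contains r9 then (back1, v1)
        else ((s ++ "9", r9) :: back1, v1.insert r9)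
      pvLoopA n fuel rest back2 v2

def find_smallest_divisible_by_n (n : Int) : String :=
  let r := PySem.Int.mod 9 n
  pvLoopA n (4 * n.natAbs + 4) [("9", r)] [] (Std.HashSet.emptyWithCapacity.insert r)

-- ===== PORT B =====
-- reconstruction while-loop of B: walk predecessors back to the seed, prepending digits.
-- fuel (= dict size + 1 at the call site) only makes the loop total; a chain never revisits a key.
def pvRebuild (pred : Std.HashMap Int (Option Int × String)) :
    Nat → Option Int → String → String
  | _, none, s => s
  | 0, some _, s => s
  | fuel+1, some c, s =>
    match pred[c]? with
    | none => s          -- KeyError in Python; unreachable: every enqueued remainder is a key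
    | some (p, d) => pvRebuild pred fuel p (d ++ s)

-- BFS loop of B: FIFO queue of remainders, dict remainder -> (parent remainder, digit).
def pvLoopB (n : Int) : Nat → List Int → List Int →
    Std.HashMap Int (Option Int × String) → String
  | 0, _, _, _ => ""
  | fuel+1, [], back, pred =>
    match back with
    | [] => ""
    | _ :: _ => pvLoopB n fuel back.reverse [] pred
  | fuel+1, r :: rest, back, pred =>
    if r = 0 then pvRebuild pred (pred.size + 1) (some r) ""
    else
      let r0 := PySem.Int.mod (r * 10) n
      let (back1, p1) :=
        if pred.contains r0 then (back, pred)
        else (r0 :: back, pred.insert r0 (some r, "0"))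
      let r9 := PySem.Int.mod (r * 10 + 9) n
      let (back2, p2) :=
        if p1.contains r9 then (back1, p1)
        else (r9 :: back1, p1.insert r9 (some r, "9"))
      pvLoopB n fuel rest back2 p2

def find_smallest_divisible_by_n_alt (n : Int) : String :=
  let r := PySem.Int.mod 9 n
  pvLoopB n (4 * n.natAbs + 4) [r] []
    (Std.HashMap.emptyWithCapacity.insert r (none, "9"))

-- ===== PRECONDITION & SPEC =====
-- Python A raises ZeroDivisionError at '9 % n' when n = 0; that is the only exception.
def Pre_find_smallest_divisible_by_n (n : Int) : Prop := n ≠ 0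
instance (n : Int) : Decidable (Pre_find_smallest_divisible_by_n n) := by
  unfold Pre_find_smallest_divisible_by_n; infer_instance
def pvWitness_find_smallest_divisible_by_n : Int := 7

def Spec_find_smallest_divisible_by_n (n : Int) (out : String) : Prop :=
  out = find_smallest_divisible_by_n_alt n
instance (n : Int) (out : String) : Decidable (Spec_find_smallest_divisible_by_n n out) := by
  unfold Spec_find_smallest_divisible_by_n; infer_instance

-- ===== CLAIM (what is proved, stated in full; the proofs are below) =====
def Claim_equal_find_smallest_divisible_by_n : Prop :=
  ∀ (n : Int), Dom_find_smallest_divisible_by_n n → Pre_find_smallest_divisible_by_n n →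
    Spec_find_smallest_divisible_by_n n (find_smallest_divisible_by_n n)

-- ===== LEMMAS AND PROOFS =====

-- pvChain pred r s k: following predecessors from r reaches the seed in k lookups, and the
-- digits met along the way (seed first) concatenate to s.
inductive pvChain (pred : Std.HashMap Int (Option Int × String)) : Int → String → Nat → Prop
  | base (c : Int) (d : String) : pred[c]? = some (none, d) → pvChain pred c d 1
  | step (c p : Int) (d s : String) (k : Nat) :
      pred[c]? = some (some p, d) → pvChain pred p s k → pvChain pred c (s ++ d) (k + 1)

theorem pvRebuild_of_chain (pred : Std.HashMap Int (Option Int × String))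
    (c : Int) (s : String) (k : Nat) (h : pvChain pred c s k) :
    ∀ (fuel : Nat), k ≤ fuel → ∀ acc, pvRebuild pred fuel (some c) acc = s ++ acc := by
  induction h with
  | base c d hd =>
      intro fuel hk acc
      match fuel, hk with
      | f+1, _ => simp [pvRebuild, hd]
  | step c p d s k hc _hch ih =>
      intro fuel hk acc
      match fuel, hk with
      | f+1, hk =>
        have hf : k ≤ f := Nat.lt_succ_iff.mp hk
        simp only [pvRebuild, hc]
        rw [ih f hf (d ++ acc), String.append_assoc]

theorem pvChain_insert_fresh (pred : Std.HashMap Int (Option Int × String))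
    (x : Int) (v : Option Int × String) (hx : pred[x]? = none)
    (c : Int) (s : String) (k : Nat) (h : pvChain pred c s k) :
    pvChain (pred.insert x v) c s k := by
  induction h with
  | base c d hd =>
      refine pvChain.base c d ?_
      have hne : (x == c) = false := by
        simp only [beq_eq_false_iff_ne, ne_eq]
        rintro rfl; rw [hx] at hd; cases hd
      rw [Std.HashMap.getElem?_insert, hne]; exact hd
  | step c p d s k hc _hch ih =>
      refine pvChain.step c p d s k ?_ ih
      have hne : (x == c) = false := by
        simp only [beq_eq_false_iff_ne, ne_eq]
        rintro rfl; rw [hx] at hc; cases hc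
      rw [Std.HashMap.getElem?_insert, hne]; exact hc

-- the loop invariant tying A's state to B's state
def pvInv (fa ba : List (String × Int)) (fb bb : List Int)
    (v : Std.HashSet Int) (pred : Std.HashMap Int (Option Int × String)) : Prop :=
  fb = fa.map Prod.snd ∧ bb = ba.map Prod.snd ∧
  (∀ x : Int, v.contains x = pred.contains x) ∧
  (∀ p ∈ fa ++ ba, ∃ k, k ≤ pred.size ∧ pvChain pred p.2 p.1 k)

theorem pv_size_insert_fresh (pred : Std.HashMap Int (Option Int × String))
    (x : Int) (v : Option Int × String) (hx : pred.contains x = false) :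
    (pred.insert x v).size = pred.size + 1 := by
  rw [Std.HashMap.size_insert]
  simp [Std.HashMap.mem_iff_contains, hx]

theorem pv_getElem?_eq_none (pred : Std.HashMap Int (Option Int × String))
    (x : Int) (hx : pred.contains x = false) : pred[x]? = none := by
  rw [← Option.not_isSome_iff_eq_none, ← Std.HashMap.contains_eq_isSome_getElem?, hx]
  simp

theorem pvLoop_eq (n : Int) (fuel : Nat) :
    ∀ (fa ba : List (String × Int)) (fb bb : List Int) (v : Std.HashSet Int)
      (pred : Std.HashMap Int (Option Int × String)),
      pvInv fa ba fb bb v pred → pvLoopA n fuel fa ba v = pvLoopB n fuel fb bb pred := by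
  induction fuel with
  | zero => intro fa ba fb bb v pred _; rfl
  | succ f ih =>
    intro fa ba fb bb v pred hinv
    obtain ⟨hf, hb, hv, hch⟩ := hinv
    subst hf; subst hb
    match fa with
    | [] =>
      match ba with
      | [] => rfl
      | q :: ba' =>
        simp only [pvLoopA]
        refine ih _ _ _ _ _ _ ⟨by simp, rfl, hv, ?_⟩
        intro p hp
        apply hch
        simp only [List.nil_append]
        simp only [List.append_nil, List.mem_reverse] at hp
        exact hp
    | (s, r) :: rest =>
      simp only [pvLoopA, pvLoopB, List.map_cons]
      by_cases hr : r = 0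
      · subst hr
        simp only [if_true]
        obtain ⟨k, hk, hc⟩ := hch (s, 0) (List.mem_append_left _ (List.mem_cons_self ..))
        rw [pvRebuild_of_chain pred 0 s k hc (pred.size + 1) (by omega) ""]
        simp
      · simp only [if_neg hr]
        obtain ⟨kr, hkr, hcr⟩ := hch (s, r) (List.mem_append_left _ (List.mem_cons_self ..))
        have hrest : ∀ p ∈ rest ++ ba, ∃ k, k ≤ pred.size ∧ pvChain pred p.2 p.1 k := by
          intro p hp
          rcases List.mem_append.mp hp with hp | hp
          · exact hch p (List.mem_append_left _ (List.mem_cons_of_mem _ hp))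
          · exact hch p (List.mem_append_right _ hp)
        set r0 := PySem.Int.mod (r * 10) n with hr0
        set r9 := PySem.Int.mod (r * 10 + 9) n with hr9
        rw [hv r0]
        by_cases h0 : pred.contains r0
        · simp only [if_pos h0]
          rw [hv r9]
          by_cases h9 : pred.contains r9
          · simp only [if_pos h9]
            exact ih _ _ _ _ _ _ ⟨rfl, rfl, hv, hrest⟩
          · simp only [if_neg h9]
            have h9' : pred.contains r9 = false := by simpa using h9
            have hx9 := pv_getElem?_eq_none pred r9 h9'
            have hsz := pv_size_insert_fresh pred r9 (some r, "9") h9'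
            refine ih _ _ _ _ _ _ ⟨rfl, by simp, ?_, ?_⟩
            · intro x
              simp [Std.HashSet.contains_insert, Std.HashMap.contains_insert, hv x]
            · intro p hp
              rcases List.mem_append.mp hp with hp | hp
              · obtain ⟨k, hk, hc⟩ := hrest p (List.mem_append_left _ hp)
                exact ⟨k, by omega, pvChain_insert_fresh _ _ _ hx9 _ _ _ hc⟩
              · rcases List.mem_cons.mp hp with hp | hp
                · subst hp
                  refine ⟨kr + 1, by omega, ?_⟩
                  refine pvChain.step r9 r "9" s kr ?_
                    (pvChain_insert_fresh _ _ _ hx9 _ _ _ hcr)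
                  rw [Std.HashMap.getElem?_insert]; simp
                · obtain ⟨k, hk, hc⟩ := hrest p (List.mem_append_right _ hp)
                  exact ⟨k, by omega, pvChain_insert_fresh _ _ _ hx9 _ _ _ hc⟩
        · simp only [if_neg h0]
          have h0' : pred.contains r0 = false := by simpa using h0
          have hx0 := pv_getElem?_eq_none pred r0 h0'
          have hsz0 := pv_size_insert_fresh pred r0 (some r, "0") h0'
          have hcr0 : pvChain (pred.insert r0 (some r, "0")) r0 (s ++ "0") (kr + 1) := by
            refine pvChain.step r0 r "0" s kr ?_
              (pvChain_insert_fresh _ _ _ hx0 _ _ _ hcr)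
            rw [Std.HashMap.getElem?_insert]; simp
          have hch0 : ∀ p ∈ rest ++ ((s ++ "0", r0) :: ba),
              ∃ k, k ≤ (pred.insert r0 (some r, "0")).size ∧
                pvChain (pred.insert r0 (some r, "0")) p.2 p.1 k := by
            intro p hp
            rcases List.mem_append.mp hp with hp | hp
            · obtain ⟨k, hk, hc⟩ := hrest p (List.mem_append_left _ hp)
              exact ⟨k, by omega, pvChain_insert_fresh _ _ _ hx0 _ _ _ hc⟩
            · rcases List.mem_cons.mp hp with hp | hp
              · subst hp; exact ⟨kr + 1, by omega, hcr0⟩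
              · obtain ⟨k, hk, hc⟩ := hrest p (List.mem_append_right _ hp)
                exact ⟨k, by omega, pvChain_insert_fresh _ _ _ hx0 _ _ _ hc⟩
          have hv0 : ∀ x, (v.insert r0).contains x
              = (pred.insert r0 (some r, "0")).contains x := by
            intro x
            simp [Std.HashSet.contains_insert, Std.HashMap.contains_insert, hv x]
          rw [hv0 r9]
          by_cases h9 : (pred.insert r0 (some r, "0")).contains r9
          · simp only [if_pos h9]
            exact ih _ _ _ _ _ _ ⟨rfl, by simp, hv0, hch0⟩
          · simp only [if_neg h9]
            have h9' : (pred.insert r0 (some r, "0")).contains r9 = false := by simpa using h9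
            have hx9 := pv_getElem?_eq_none _ r9 h9'
            have hsz9 := pv_size_insert_fresh _ r9 (some r, "9") h9'
            refine ih _ _ _ _ _ _ ⟨rfl, by simp, ?_, ?_⟩
            · intro x
              simp [Std.HashSet.contains_insert, Std.HashMap.contains_insert, hv x]
            · intro p hp
              rcases List.mem_append.mp hp with hp | hp
              · obtain ⟨k, hk, hc⟩ := hch0 p (List.mem_append_left _ hp)
                exact ⟨k, by omega, pvChain_insert_fresh _ _ _ hx9 _ _ _ hc⟩
              · rcases List.mem_cons.mp hp with hp | hp
                · subst hp
                  refine ⟨kr + 1, by omega, ?_⟩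
                  refine pvChain.step r9 r "9" s kr ?_
                    (pvChain_insert_fresh _ _ _ hx9 _ _ _
                      (pvChain_insert_fresh _ _ _ hx0 _ _ _ hcr))
                  rw [Std.HashMap.getElem?_insert]; simp
                · obtain ⟨k, hk, hc⟩ := hch0 p (by
                    rcases List.mem_cons.mp hp with hp | hp
                    · exact hp ▸ List.mem_append_right _ (List.mem_cons_self ..)
                    · exact List.mem_append_right _ (List.mem_cons_of_mem _ hp))
                  exact ⟨k, by omega, pvChain_insert_fresh _ _ _ hx9 _ _ _ hc⟩

-- ===== VERDICT (by name: the statement is the Claim_ definition above) =====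
theorem find_smallest_divisible_by_n_spec : Claim_equal_find_smallest_divisible_by_n := by
  intro n _ _
  unfold Spec_find_smallest_divisible_by_n find_smallest_divisible_by_n find_smallest_divisible_by_n_alt
  apply pvLoop_eq
  refine ⟨rfl, rfl, ?_, ?_⟩
  · intro x
    rw [Std.HashSet.contains_insert, Std.HashMap.contains_insert]
    simp
  · intro p hp
    simp only [List.append_nil, List.mem_singleton] at hp; subst hp
    refine ⟨1, by simp [pv_size_insert_fresh], ?_⟩
    refine pvChain.base _ _ ?_
    rw [Std.HashMap.getElem?_insert]; simp
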